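-- pv_equiv track=rewrite | github.com/densemikin/TestProj | test_python.py | calculate_subs
-- ===== SOURCE A (Python) =====
-- def calculate_subs(numb_list):
--
--     if [i for i in numb_list if i > 100]:
--         separ = numb_list.index(max(numb_list))
--         mid = numb_list[separ]
--         ll = calculate_subs(numb_list[:separ])
--         rr = calculate_subs(numb_list[separ+1:])
--         return (ll * mid) + rr
--
--     else:
--         sub_val = 0
--         for i in numb_list:
--             if i % 100 == 0:
--                 sub_val *= i
--             else:
--                 sub_val += i
--
--         return sub_val
-- ===== SOURCE B (Python) =====
-- def calculate_subs(numb_list):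
--     # One left-to-right pass: elements > 100 are treated as nodes of the
--     # max-Cartesian tree (leftmost max on top), maintained with a monotonic
--     # stack of (value, left_subtree_result); runs of elements <= 100 are
--     # folded directly with the base rule.
--     stack = []  # values non-increasing bottom -> top
--     acc = 0     # base-rule fold of the current run of small elements
--     for v in numb_list:
--         if v > 100:
--             cur = acc
--             while stack and stack[-1][0] < v:
--                 m, left = stack.pop()
--                 cur = left * m + cur
--             stack.append((v, cur))
--             acc = 0
--         elif v % 100 == 0:
--             acc *= v
--         else:
--             acc += v
--     res = acc
--     while stack:
--         m, left = stack.pop()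
--         res = left * m + res
--     return res
-- ===== Notes on version B (the rewrite author's own statement) =====
-- stated objective: faster
-- what changed: Replaced the recursive split-at-leftmost-max (which rescans and reslices the list at every level, O(n^2) worst case) by a single left-to-right pass with a monotonic stack that builds and evaluates the max-Cartesian tree on the fly in O(n).
import Mathlib
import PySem

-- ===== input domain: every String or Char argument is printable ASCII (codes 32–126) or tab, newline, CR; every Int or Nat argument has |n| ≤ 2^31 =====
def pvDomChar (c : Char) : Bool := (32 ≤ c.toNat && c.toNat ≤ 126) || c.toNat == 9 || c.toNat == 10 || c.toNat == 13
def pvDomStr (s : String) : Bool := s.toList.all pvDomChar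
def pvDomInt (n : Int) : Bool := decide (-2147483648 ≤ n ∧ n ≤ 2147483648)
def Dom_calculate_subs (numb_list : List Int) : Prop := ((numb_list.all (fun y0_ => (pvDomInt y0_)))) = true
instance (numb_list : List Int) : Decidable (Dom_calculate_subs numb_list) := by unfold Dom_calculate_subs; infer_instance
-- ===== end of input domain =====

-- B replaces A's recursive split at the leftmost maximum (rescanning the list at
-- every level) by one left-to-right monotonic-stack pass; objective: faster (O(n) vs O(n^2)).

-- ===== PORT A =====
-- literal transliteration of A: comprehension test, max + index, slices, recursion;
-- the `none` match arms are unreachable (the list is nonempty when they are evaluated),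
-- and pyGetD is exact here since `separ` is a valid index returned by index?.
def calculate_subs (numb_list : List Int) : Int :=
  if List.filter (fun i => decide (100 < i)) numb_list ≠ [] then
    match PySem.List.max? numb_list (fun x => x) with
    | none => 0
    | some mx =>
      match h2 : PySem.List.index? numb_list mx with
      | none => 0
      | some separ =>
        let mid := PySem.List.pyGetD numb_list (separ : Int) 0
        let ll := calculate_subs (PySem.List.slice numb_list (some 0) (some (separ : Int)))
        let rr := calculate_subs (PySem.List.slice numb_list (some ((separ : Int) + 1)) none)
        ll * mid + rr
  else
    numb_list.foldl (fun sub_val i => if PySem.Int.mod i 100 = 0 then sub_val * i else sub_val + i) 0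
termination_by numb_list.length
decreasing_by
  · obtain ⟨hk, -, -⟩ := PySem.List.getElem_of_index?_eq_some h2
    simp [PySem.List.slice_zero_start, PySem.List.slice_to_natCast]
    omega
  · obtain ⟨hk, -, -⟩ := PySem.List.getElem_of_index?_eq_some h2
    have : ((separ : Int) + 1) = ((separ + 1 : Nat) : Int) := by push_cast; ring
    rw [this, PySem.List.slice_from_natCast]
    simp
    omega

-- ===== PORT B =====
-- pop while the stack top is smaller than v, folding popped entries into cur
def popLoop : List (Int × Int) → Int → Int → List (Int × Int) × Int
  | [], cur, _ => ([], cur)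
  | (m, left) :: rest, cur, v =>
    if m < v then popLoop rest (left * m + cur) v else ((m, left) :: rest, cur)

def stepB (st : List (Int × Int) × Int) (v : Int) : List (Int × Int) × Int :=
  if 100 < v then
    let p := popLoop st.1 st.2 v
    ((v, p.2) :: p.1, 0)
  else if PySem.Int.mod v 100 = 0 then (st.1, st.2 * v)
  else (st.1, st.2 + v)

def finishB : List (Int × Int) → Int → Int
  | [], res => res
  | (m, left) :: rest, res => finishB rest (left * m + res)

def calculate_subs_alt (numb_list : List Int) : Int :=
  let r := numb_list.foldl stepB ([], 0)
  finishB r.1 r.2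

-- ===== PRECONDITION & SPEC =====
def Spec_calculate_subs (numb_list : List Int) (out : Int) : Prop := out = calculate_subs_alt numb_list
instance (numb_list : List Int) (out : Int) : Decidable (Spec_calculate_subs numb_list out) := by unfold Spec_calculate_subs; infer_instance

-- ===== CLAIM (what is proved, stated in full; the proofs are below) =====
def Claim_equal_calculate_subs : Prop := ∀ (numb_list : List Int), Dom_calculate_subs numb_list → Spec_calculate_subs numb_list (calculate_subs numb_list)

-- ===== LEMMAS AND PROOFS =====

theorem finishB_append (s t : List (Int × Int)) (res : Int) :
    finishB (s ++ t) res = finishB t (finishB s res) := by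
  induction s generalizing res with
  | nil => rfl
  | cons p s ih => cases p; simp [finishB, ih]

theorem popLoop_subset {s : List (Int × Int)} {cur v : Int} :
    ∀ p ∈ (popLoop s cur v).1, p ∈ s := by
  induction s generalizing cur with
  | nil => simp [popLoop]
  | cons q s ih =>
    cases q with
    | mk m left =>
      intro p hp
      by_cases h : m < v
      · simp only [popLoop, if_pos h] at hp
        exact List.mem_cons_of_mem _ (ih _ hp)
      · simp only [popLoop, if_neg h] at hp
        exact hp

theorem popLoop_popall {v : Int} :
    ∀ (s : List (Int × Int)) (cur : Int), (∀ p ∈ s, p.1 < v) →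
    popLoop s cur v = ([], finishB s cur) := by
  intro s
  induction s with
  | nil => intro cur _; rfl
  | cons q s ih =>
    cases q with
    | mk m left =>
      intro cur hall
      have hm : m < v := hall (m, left) (List.mem_cons_self)
      simp only [popLoop, if_pos hm, finishB]
      exact ih _ (fun p hp => hall p (List.mem_cons_of_mem _ hp))

theorem popLoop_append {m0 L0 v : Int} (hv : ¬ m0 < v) (t : List (Int × Int)) :
    ∀ (s : List (Int × Int)) (cur : Int),
    popLoop (s ++ (m0, L0) :: t) cur v
      = ((popLoop s cur v).1 ++ (m0, L0) :: t, (popLoop s cur v).2) := by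
  intro s
  induction s with
  | nil => intro cur; simp [popLoop, if_neg hv]
  | cons q s ih =>
    cases q with
    | mk m left =>
      intro cur
      by_cases h : m < v
      · simp only [List.cons_append, popLoop, if_pos h]; exact ih _
      · simp [popLoop, if_neg h]

-- stack values produced by the fold come from the initial stack or from the input list
theorem stack_values :
    ∀ (l : List Int) (s : List (Int × Int)) (a : Int) (p : Int × Int),
    p ∈ (l.foldl stepB (s, a)).1 → p.1 ∈ s.map Prod.fst ∨ p.1 ∈ l := by
  intro l
  induction l with
  | nil => intro s a p hp; left; exact List.mem_map_of_mem hp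
  | cons v l ih =>
    intro s a p hp
    rw [List.foldl_cons] at hp
    by_cases hv : 100 < v
    · simp only [stepB, if_pos hv] at hp
      rcases ih _ _ _ hp with h | h
      · simp only [List.map_cons, List.mem_cons] at h
        rcases h with h | h
        · right; simp [h]
        · rcases List.mem_map.mp h with ⟨q, hq, hq2⟩
          left
          exact List.mem_map.mpr ⟨q, popLoop_subset q hq, hq2⟩
      · right; exact List.mem_cons_of_mem _ h
    · have : stepB (s, a) v = (s, (stepB (s, a) v).2) := by
        simp only [stepB, if_neg hv]; split_ifs <;> rfl
      rw [this] at hp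
      rcases ih _ _ _ hp with h | h
      · left; exact h
      · right; exact List.mem_cons_of_mem _ h

-- a run containing no element > 100 leaves the stack alone and folds the base rule
theorem run_small :
    ∀ (l : List Int) (s : List (Int × Int)) (a : Int), (∀ v ∈ l, ¬ 100 < v) →
    l.foldl stepB (s, a)
      = (s, l.foldl (fun sub_val i => if PySem.Int.mod i 100 = 0 then sub_val * i else sub_val + i) a) := by
  intro l
  induction l with
  | nil => intro s a _; rfl
  | cons v l ih =>
    intro s a hall
    have hv : ¬ 100 < v := hall v (List.mem_cons_self)
    rw [List.foldl_cons, List.foldl_cons]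
    have : stepB (s, a) v = (s, if PySem.Int.mod v 100 = 0 then a * v else a + v) := by
      simp only [stepB, if_neg hv]; split_ifs <;> rfl
    rw [this]
    exact ih _ _ (fun w hw => hall w (List.mem_cons_of_mem _ hw))

-- a deep stack entry that dominates all remaining input stays untouched under the run
theorem run_over (m0 L0 : Int) (t : List (Int × Int)) :
    ∀ (l : List Int) (s : List (Int × Int)) (a : Int), (∀ v ∈ l, v ≤ m0) →
    l.foldl stepB (s ++ (m0, L0) :: t, a)
      = ((l.foldl stepB (s, a)).1 ++ (m0, L0) :: t, (l.foldl stepB (s, a)).2) := by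
  intro l
  induction l with
  | nil => intro s a _; rfl
  | cons v l ih =>
    intro s a hall
    have hle : v ≤ m0 := hall v (List.mem_cons_self)
    have htail : ∀ w ∈ l, w ≤ m0 := fun w hw => hall w (List.mem_cons_of_mem _ hw)
    rw [List.foldl_cons, List.foldl_cons]
    by_cases hv : 100 < v
    · simp only [stepB, if_pos hv]
      rw [popLoop_append (by omega) t s a]
      exact ih ((v, (popLoop s a v).2) :: (popLoop s a v).1) 0 htail
    · have h1 : stepB (s ++ (m0, L0) :: t, a) v = (s ++ (m0, L0) :: t, (stepB (s, a) v).2) := by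
        simp only [stepB, if_neg hv]; split_ifs <;> rfl
      have h2 : stepB (s, a) v = (s, (stepB (s, a) v).2) := by
        simp only [stepB, if_neg hv]; split_ifs <;> rfl
      rw [h1, h2] at *
      exact ih s _ htail

theorem B_base (xs : List Int) (h : ∀ v ∈ xs, ¬ 100 < v) :
    calculate_subs_alt xs
      = xs.foldl (fun sub_val i => if PySem.Int.mod i 100 = 0 then sub_val * i else sub_val + i) 0 := by
  unfold calculate_subs_alt
  rw [run_small xs [] 0 h]
  rfl

theorem B_big (pre suf : List Int) (mx : Int) (h100 : 100 < mx)
    (hpre : ∀ y ∈ pre, y < mx) (hsuf : ∀ y ∈ suf, y ≤ mx) :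
    calculate_subs_alt (pre ++ mx :: suf)
      = calculate_subs_alt pre * mx + calculate_subs_alt suf := by
  unfold calculate_subs_alt
  rw [List.foldl_append, List.foldl_cons]
  have hstack : ∀ p ∈ (pre.foldl stepB (([] : List (Int × Int)), 0)).1, p.1 < mx := by
    intro p hp
    rcases stack_values pre [] 0 p hp with h | h
    · simp at h
    · exact hpre _ h
  have hpop : popLoop (pre.foldl stepB ([], 0)).1 (pre.foldl stepB ([], 0)).2 mx
      = ([], finishB (pre.foldl stepB ([], 0)).1 (pre.foldl stepB ([], 0)).2) :=
    popLoop_popall _ _ hstack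
  have hstep : stepB (pre.foldl stepB ([], 0)) mx
      = ([(mx, finishB (pre.foldl stepB ([], 0)).1 (pre.foldl stepB ([], 0)).2)], 0) := by
    simp only [stepB, if_pos h100, hpop]
  rw [hstep]
  have := run_over mx (finishB (pre.foldl stepB ([], 0)).1 (pre.foldl stepB ([], 0)).2) []
      suf [] 0 hsuf
  simp only [List.nil_append] at this
  rw [this, finishB_append]
  simp [finishB]

theorem A_base (xs : List Int) (h : List.filter (fun i => decide (100 < i)) xs = []) :
    calculate_subs xs
      = xs.foldl (fun sub_val i => if PySem.Int.mod i 100 = 0 then sub_val * i else sub_val + i) 0 := by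
  rw [calculate_subs]
  simp [h]

theorem A_big (pre suf : List Int) (mx : Int) (h100 : 100 < mx)
    (hmax : ∀ y ∈ pre ++ mx :: suf, y ≤ mx) (hnot : mx ∉ pre) :
    calculate_subs (pre ++ mx :: suf)
      = calculate_subs pre * mx + calculate_subs suf := by
  rw [calculate_subs]
  have hcond : List.filter (fun i => decide (100 < i)) (pre ++ mx :: suf) ≠ [] := by
    intro hc
    have : mx ∈ List.filter (fun i => decide (100 < i)) (pre ++ mx :: suf) := by
      simp [List.mem_filter, h100]
    rw [hc] at this; simp at this
  rw [if_pos hcond]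
  -- the max? value is mx
  have hne : (pre ++ mx :: suf) ≠ [] := by simp
  obtain ⟨m, hm⟩ : ∃ m, PySem.List.max? (pre ++ mx :: suf) (fun x => x) = some m := by
    cases hx : PySem.List.max? (pre ++ mx :: suf) (fun x => x) with
    | none => exact absurd ((PySem.List.max?_eq_none_iff _ _).mp hx) hne
    | some m => exact ⟨m, rfl⟩
  have hmem : m ∈ pre ++ mx :: suf := PySem.List.max?_mem hm
  have hmmax : ∀ y ∈ pre ++ mx :: suf, y ≤ m := PySem.List.max?_isMax hm
  have hmx : m = mx := le_antisymm (hmax m hmem) (hmmax mx (by simp))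
  subst hmx
  have hidx : PySem.List.index? (pre ++ m :: suf) m = some pre.length :=
    (PySem.List.index?_eq_some_iff _ _ _).mpr ⟨pre, suf, rfl, rfl, hnot⟩

  have hget : PySem.List.pyGetD (pre ++ m :: suf) (pre.length : Int) 0 = m := by
    rw [PySem.List.pyGetD_natCast]
    simp [List.getD]
  have hsl1 : PySem.List.slice (pre ++ m :: suf) (some 0) (some (pre.length : Int)) = pre := by
    simp [PySem.List.slice_zero_start, PySem.List.slice_to_natCast]
  have hsl2 : PySem.List.slice (pre ++ m :: suf) (some ((pre.length : Int) + 1)) none = suf := by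
    have : ((pre.length : Int) + 1) = ((pre.length + 1 : Nat) : Int) := by push_cast; ring
    rw [this, PySem.List.slice_from_natCast]
    simp [List.drop_append]
  simp only [hm]
  split
  · rename_i heq
    rw [hidx] at heq
    cases heq
  · rename_i separ heq
    rw [hidx] at heq
    injection heq with heq'
    subst heq'
    rw [hget, hsl1, hsl2]

theorem main_eq : ∀ (n : Nat) (xs : List Int), xs.length ≤ n →
    calculate_subs xs = calculate_subs_alt xs := by
  intro n
  induction n with
  | zero =>
    intro xs hlen
    have : xs = [] := List.eq_nil_of_length_eq_zero (Nat.le_zero.mp hlen)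
    subst this
    rw [A_base [] rfl, B_base [] (by simp)]
  | succ n ih =>
    intro xs hlen
    by_cases hbig : ∃ i ∈ xs, 100 < i
    · -- there is a big element: split at the leftmost maximum
      obtain ⟨i0, hi0, hi0big⟩ := hbig
      have hne : xs ≠ [] := by intro h; subst h; simp at hi0
      obtain ⟨m, hm⟩ : ∃ m, PySem.List.max? xs (fun x => x) = some m := by
        cases hx : PySem.List.max? xs (fun x => x) with
        | none => exact absurd ((PySem.List.max?_eq_none_iff _ _).mp hx) hne
        | some m => exact ⟨m, rfl⟩
      have hmem : m ∈ xs := PySem.List.max?_mem hm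
      have hmmax : ∀ y ∈ xs, y ≤ m := PySem.List.max?_isMax hm
      have h100 : 100 < m := lt_of_lt_of_le hi0big (hmmax _ hi0)
      obtain ⟨k, hk⟩ : ∃ k, PySem.List.index? xs m = some k := by
        cases hx : PySem.List.index? xs m with
        | none => exact absurd ((PySem.List.index?_eq_none_iff _ _).mp hx) (by simpa using hmem)
        | some k => exact ⟨k, rfl⟩
      obtain ⟨pre, suf, hxs, -, hnot⟩ := (PySem.List.index?_eq_some_iff _ _ _).mp hk
      subst hxs
      have hlpre : pre.length ≤ n := by simp at hlen; omega
      have hlsuf : suf.length ≤ n := by simp at hlen; omega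
      have hpre : ∀ y ∈ pre, y < m := by
        intro y hy
        have hle := hmmax y (by simp [hy])
        rcases lt_or_eq_of_le hle with h | h
        · exact h
        · exact absurd (h ▸ hy) hnot
      have hsuf : ∀ y ∈ suf, y ≤ m := fun y hy => hmmax y (by simp [hy])
      rw [A_big pre suf m h100 hmmax hnot, B_big pre suf m h100 hpre hsuf,
          ih pre hlpre, ih suf hlsuf]
    · -- no element exceeds 100: both sides are the base fold
      push_neg at hbig
      have hfil : List.filter (fun i => decide (100 < i)) xs = [] := by
        rw [List.filter_eq_nil_iff]
        intro a ha
        simpa using hbig a ha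
      rw [A_base xs hfil, B_base xs (fun v hv => not_lt.mpr (hbig v hv))]

-- ===== VERDICT (by name: the statement is the Claim_ definition above) =====
theorem calculate_subs_spec : Claim_equal_calculate_subs := by
  intro xs _
  unfold Spec_calculate_subs
  exact main_eq xs.length xs (Nat.le_refl _)
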